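-- pv_equiv track=rewrite | github.com/paprikacc/promos-argentina | scripts/normalizer.py | normalize_dias
-- ===== SOURCE A (Python) =====
-- def normalize_dias(dias):
--     """Normaliza los días de la semana"""
--     if not dias:
--         return []
--
--     dias_correctos = {
--         'lunes': 'Lunes',
--         'martes': 'Martes',
--         'miércoles': 'Miércoles',
--         'miercoles': 'Miércoles',
--         'jueves': 'Jueves',
--         'viernes': 'Viernes',
--         'sábado': 'Sábado',
--         'sabado': 'Sábado',
--         'domingo': 'Domingo'
--     }
--
--     normalized = []
--     for dia in dias:
--         dia_lower = dia.strip().lower()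
--         if dia_lower in dias_correctos:
--             normalized_dia = dias_correctos[dia_lower]
--             if normalized_dia not in normalized:
--                 normalized.append(normalized_dia)
--
--     # Ordenar por día de la semana
--     orden_dias = ['Lunes', 'Martes', 'Miércoles', 'Jueves', 'Viernes', 'Sábado', 'Domingo']
--     normalized.sort(key=lambda x: orden_dias.index(x) if x in orden_dias else 7)
--
--     return normalized
-- ===== SOURCE B (Python) =====
-- def normalize_dias(dias):
--     """Normaliza los días de la semana"""
--     if not dias:
--         return []
--
--     dias_correctos = {
--         'lunes': 'Lunes',
--         'martes': 'Martes',
--         'miércoles': 'Miércoles',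
--         'miercoles': 'Miércoles',
--         'jueves': 'Jueves',
--         'viernes': 'Viernes',
--         'sábado': 'Sábado',
--         'sabado': 'Sábado',
--         'domingo': 'Domingo'
--     }
--
--     presentes = set()
--     for dia in dias:
--         nd = dias_correctos.get(dia.strip().lower())
--         if nd is not None:
--             presentes.add(nd)
--
--     orden_dias = ['Lunes', 'Martes', 'Miércoles', 'Jueves', 'Viernes', 'Sábado', 'Domingo']
--     return [d for d in orden_dias if d in presentes]
-- ===== Notes on version B (the rewrite author's own statement) =====
-- stated objective: simpler
-- what changed: B replaces A's dedup-list-with-membership-scan plus final sort-by-index with a single pass that collects canonical names into a set, then projects the fixed canonical weekday order through that set, eliminating the sort and the 'not in normalized' scan entirely.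
import Mathlib
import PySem

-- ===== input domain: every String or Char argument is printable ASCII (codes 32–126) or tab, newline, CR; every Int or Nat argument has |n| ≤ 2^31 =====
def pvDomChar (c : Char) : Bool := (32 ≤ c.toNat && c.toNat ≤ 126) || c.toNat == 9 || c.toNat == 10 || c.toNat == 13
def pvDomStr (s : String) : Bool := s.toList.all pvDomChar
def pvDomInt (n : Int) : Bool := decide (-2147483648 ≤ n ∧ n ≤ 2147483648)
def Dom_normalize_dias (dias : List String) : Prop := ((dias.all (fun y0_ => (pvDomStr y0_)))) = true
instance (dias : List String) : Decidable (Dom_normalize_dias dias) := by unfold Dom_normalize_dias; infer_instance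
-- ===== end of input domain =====

-- B collects the canonical names into a set in one pass and projects the fixed
-- canonical weekday order through it, instead of A's dedup list + sort-by-index (simpler).

-- Shared literal constants of both Python sources
def pvDiasDict : PySem.Dict String String :=
  PySem.Dict.mk [("lunes","Lunes"),("martes","Martes"),("miércoles","Miércoles"),
    ("miercoles","Miércoles"),("jueves","Jueves"),("viernes","Viernes"),
    ("sábado","Sábado"),("sabado","Sábado"),("domingo","Domingo")]

def pvOrdenDias : List String := ["Lunes","Martes","Miércoles","Jueves","Viernes","Sábado","Domingo"]

-- ===== PORT A =====
-- key of A's sort: orden_dias.index(x) if x in orden_dias else 7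
def pvKeyA (x : String) : Nat :=
  if x ∈ pvOrdenDias then (PySem.List.index? pvOrdenDias x).getD 7 else 7

def normalize_dias (dias : List String) : List String :=
  if dias = [] then []
  else
    let normalized := dias.foldl (fun acc dia =>
      let dia_lower := PySem.Str.lower (PySem.Str.strip dia)
      match pvDiasDict.get? dia_lower with
      | some normalized_dia =>
          if normalized_dia ∈ acc then acc else acc ++ [normalized_dia]
      | none => acc) []
    PySem.List.sorted normalized pvKeyA false

-- ===== PORT B =====
def normalize_dias_alt (dias : List String) : List String :=
  if dias = [] then []
  else
    let presentes := dias.foldl (fun s dia =>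
      match pvDiasDict.get? (PySem.Str.lower (PySem.Str.strip dia)) with
      | some nd => PySem.Set.add s nd
      | none => s) PySem.Set.empty
    pvOrdenDias.filter (fun d => PySem.Set.contains presentes d)

-- ===== PRECONDITION & SPEC =====
def Spec_normalize_dias (dias : List String) (out : List String) : Prop := out = normalize_dias_alt dias
instance (dias : List String) (out : List String) : Decidable (Spec_normalize_dias dias out) := by unfold Spec_normalize_dias; infer_instance

-- ===== CLAIM (what is proved, stated in full; the proofs are below) =====
def Claim_equal_normalize_dias : Prop := ∀ (dias : List String), Dom_normalize_dias dias → Spec_normalize_dias dias (normalize_dias dias)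

-- ===== LEMMAS AND PROOFS =====

-- the per-element lookup both loops perform
def pvLook (dia : String) : Option String :=
  pvDiasDict.get? (PySem.Str.lower (PySem.Str.strip dia))

-- A's dedup-append step is Set.add
lemma pv_stepA_eq_stepB (acc : List String) (dia : String) :
    (match pvDiasDict.get? (PySem.Str.lower (PySem.Str.strip dia)) with
      | some nd => if nd ∈ acc then acc else acc ++ [nd]
      | none => acc)
    = (match pvDiasDict.get? (PySem.Str.lower (PySem.Str.strip dia)) with
      | some nd => PySem.Set.add acc nd
      | none => acc) := by
  cases pvDiasDict.get? (PySem.Str.lower (PySem.Str.strip dia)) with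
  | none => rfl
  | some nd => simp [PySem.Set.add_eq_ite]

-- B's loop is the fold of Set.add over the successful lookups
lemma pv_loopB_eq_filterMap (dias : List String) (s : PySem.Set String) :
    dias.foldl (fun s dia =>
      match pvDiasDict.get? (PySem.Str.lower (PySem.Str.strip dia)) with
      | some nd => PySem.Set.add s nd
      | none => s) s
    = (dias.filterMap pvLook).foldl PySem.Set.add s := by
  induction dias generalizing s with
  | nil => simp only [List.foldl_nil, List.filterMap_nil]
  | cons d t ih =>
      cases h : pvDiasDict.get? (PySem.Str.lower (PySem.Str.strip d)) with
      | none =>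
          simp only [List.foldl_cons, List.filterMap_cons, pvLook, h]
          exact ih s
      | some nd =>
          simp only [List.foldl_cons, List.filterMap_cons, pvLook, h]
          exact ih _

-- B's loop from the empty set builds exactly set(successful lookups)
lemma pv_loopB_eq_ofList (dias : List String) :
    dias.foldl (fun s dia =>
      match pvDiasDict.get? (PySem.Str.lower (PySem.Str.strip dia)) with
      | some nd => PySem.Set.add s nd
      | none => s) PySem.Set.empty
    = PySem.Set.ofList (dias.filterMap pvLook) := by
  rw [show (PySem.Set.empty : PySem.Set String) = [] from rfl,
      pv_loopB_eq_filterMap, PySem.Set.ofList_eq_foldl]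

-- every value of the dict is a canonical weekday
lemma pv_look_mem_orden {dia v : String} (h : pvLook dia = some v) : v ∈ pvOrdenDias := by
  unfold pvLook pvDiasDict at h
  simp only [PySem.Dict.get?_mk_cons,
    show ∀ k : String, (PySem.Dict.mk ([] : List (String × String))).get? k = none from
      fun _ => rfl] at h
  split_ifs at h <;> simp_all [pvOrdenDias]

-- canonical-order facts, computed once
lemma pv_orden_nodup : pvOrdenDias.Nodup := by decide

lemma pv_orden_pairwise : pvOrdenDias.Pairwise (fun a b => pvKeyA a < pvKeyA b) := by decide

-- sorting a dedup set of canonical names by A's key IS projecting the canonical order through it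
lemma pv_sorted_eq_filter (l : List String) (hl : ∀ x ∈ l, x ∈ pvOrdenDias) :
    PySem.List.sorted (PySem.Set.ofList l) pvKeyA
      = pvOrdenDias.filter (fun d => PySem.Set.contains (PySem.Set.ofList l) d) := by
  apply PySem.List.sorted_eq_of_perm_of_pairwise_lt
  · rw [List.perm_ext_iff_of_nodup (List.Nodup.filter _ pv_orden_nodup)
        (PySem.Set.nodup_ofList l)]
    intro x
    simp only [List.mem_filter]
    constructor
    · intro h
      simpa using h.2
    · intro hx
      refine ⟨?_, by simpa using hx⟩
      rw [PySem.Set.mem_ofList] at hx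
      exact hl x hx
  · exact List.Pairwise.filter _ pv_orden_pairwise

theorem normalize_dias_spec_aux (dias : List String) :
    normalize_dias dias = normalize_dias_alt dias := by
  unfold normalize_dias normalize_dias_alt
  by_cases hnil : dias = []
  · subst hnil; simp
  · rw [if_neg hnil, if_neg hnil]
    -- A's dedup loop is B's Set.add loop
    have hAB : dias.foldl (fun acc dia =>
        let dia_lower := PySem.Str.lower (PySem.Str.strip dia)
        match pvDiasDict.get? dia_lower with
        | some normalized_dia =>
            if normalized_dia ∈ acc then acc else acc ++ [normalized_dia]
        | none => acc) []
      = dias.foldl (fun s dia =>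
        match pvDiasDict.get? (PySem.Str.lower (PySem.Str.strip dia)) with
        | some nd => PySem.Set.add s nd
        | none => s) [] :=
      PySem.List.foldl_congr_mem _ _ _ _ (fun acc dia _ => pv_stepA_eq_stepB acc dia)
    rw [hAB, pv_loopB_eq_ofList, pv_loopB_eq_filterMap, ← PySem.Set.ofList_eq_foldl]
    exact pv_sorted_eq_filter _ (fun x hx => by
      obtain ⟨d, _, hd⟩ := List.mem_filterMap.mp hx
      exact pv_look_mem_orden hd)

-- ===== VERDICT (by name: the statement is the Claim_ definition above) =====
theorem normalize_dias_spec : Claim_equal_normalize_dias := by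
  intro dias _
  unfold Spec_normalize_dias
  exact normalize_dias_spec_aux dias
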